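-- pv_equiv track=rewrite | github.com/Liibon/xdp-recon | scripts/reconcile.py | parse_iplink_stats
-- ===== SOURCE A (Python) =====
-- def parse_iplink_stats(text):
--     """Extract tx and rx packet and drop counts from `ip -s link show`."""
--     out = {"rx_packets": 0, "rx_dropped": 0, "tx_packets": 0, "tx_dropped": 0}
--     lines = text.splitlines()
--     for i, line in enumerate(lines):
--         s = line.strip()
--         if s.startswith("RX:") and i + 1 < len(lines):
--             parts = lines[i + 1].split()
--             if len(parts) >= 4:
--                 out["rx_packets"] = int(parts[1])
--                 out["rx_dropped"] = int(parts[3])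
--         if s.startswith("TX:") and i + 1 < len(lines):
--             parts = lines[i + 1].split()
--             if len(parts) >= 4:
--                 out["tx_packets"] = int(parts[1])
--                 out["tx_dropped"] = int(parts[3])
--     return out
-- ===== SOURCE B (Python) =====
-- def _last_stats(lines, prefix):
--     """Backward scan: value of the LAST effective header block (last write wins in A)."""
--     for i in range(len(lines) - 2, -1, -1):
--         if lines[i].strip().startswith(prefix):
--             parts = lines[i + 1].split()
--             if len(parts) >= 4:
--                 return (int(parts[1]), int(parts[3]))
--     return (0, 0)
--
--
-- def parse_iplink_stats(text):
--     """Extract tx and rx packet and drop counts from `ip -s link show`."""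
--     lines = text.splitlines()
--     rx = _last_stats(lines, "RX:")
--     tx = _last_stats(lines, "TX:")
--     return {
--         "rx_packets": rx[0],
--         "rx_dropped": rx[1],
--         "tx_packets": tx[0],
--         "tx_dropped": tx[1],
--     }
-- ===== Notes on version B (the rewrite author's own statement) =====
-- stated objective: alternative
-- what changed: Instead of A's forward loop that repeatedly overwrites a dict at each header block, B scans the line-pair list backwards once per key pair, returning the first (i.e. last-in-text) valid stats block and building the result dict only at the end.
import Mathlib
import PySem

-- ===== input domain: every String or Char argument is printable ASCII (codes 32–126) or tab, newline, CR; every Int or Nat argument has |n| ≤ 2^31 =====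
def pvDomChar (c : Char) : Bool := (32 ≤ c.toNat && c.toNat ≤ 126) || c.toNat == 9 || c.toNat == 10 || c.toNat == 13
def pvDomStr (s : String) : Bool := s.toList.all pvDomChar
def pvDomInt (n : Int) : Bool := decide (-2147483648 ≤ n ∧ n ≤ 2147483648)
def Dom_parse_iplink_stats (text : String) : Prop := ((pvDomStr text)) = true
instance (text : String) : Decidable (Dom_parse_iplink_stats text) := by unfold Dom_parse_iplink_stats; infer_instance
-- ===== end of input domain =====

-- B replaces A's forward overwrite loop by two independent BACKWARD searches (last write wins),
-- building the result dict once at the end; alternative decomposition, same asymptotic cost.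

-- ===== PORT A =====
-- inner block: "parts = lines[i+1].split(); if len(parts) >= 4: out[kp]=int(parts[1]); out[kd]=int(parts[3])"
-- (.getD 0 is unreachable under Pre_: Python raises ValueError exactly where ofStr? is none)
def pvApply (kp kd : String) (next : String) (d : PySem.Dict String Int) : PySem.Dict String Int :=
  let parts := PySem.Str.split₀ next
  if 4 ≤ parts.length then
    (d.insert kp ((PySem.Int.ofStr? (parts.getD 1 "")).getD 0)).insert kd
      ((PySem.Int.ofStr? (parts.getD 3 "")).getD 0)
  else d

-- A's loop: at line i, 'i + 1 < len(lines)' ⟺ the rest of the list is nonempty, lines[i+1] = its head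
def pvLoopA : List String → PySem.Dict String Int → PySem.Dict String Int
  | [], d => d
  | line :: rest, d =>
    let s := PySem.Str.strip line
    let d1 := if PySem.Str.startswith s "RX:" = true then
        (match rest with
         | next :: _ => pvApply "rx_packets" "rx_dropped" next d
         | [] => d)
      else d
    let d2 := if PySem.Str.startswith s "TX:" = true then
        (match rest with
         | next :: _ => pvApply "tx_packets" "tx_dropped" next d1
         | [] => d1)
      else d1
    pvLoopA rest d2

def pvInit : PySem.Dict String Int :=
  PySem.Dict.ofList [("rx_packets", 0), ("rx_dropped", 0), ("tx_packets", 0), ("tx_dropped", 0)]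

def parse_iplink_stats (text : String) : List (String × Int) :=
  (pvLoopA (PySem.Str.splitlines text) pvInit).items

-- ===== PORT B =====
-- _last_stats: Python's downward index loop 'for i in range(len(lines)-2, -1, -1)' over the
-- pairs (lines[i], lines[i+1]) IS head-first recursion over (lines.zip lines.tail).reverse.
def pvLastStats (pfx : String) : List (String × String) → Int × Int
  | [] => (0, 0)
  | (line, next) :: rest =>
    if PySem.Str.startswith (PySem.Str.strip line) pfx = true then
      let parts := PySem.Str.split₀ next
      if 4 ≤ parts.length then
        (((PySem.Int.ofStr? (parts.getD 1 "")).getD 0),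
         ((PySem.Int.ofStr? (parts.getD 3 "")).getD 0))
      else pvLastStats pfx rest
    else pvLastStats pfx rest

def parse_iplink_stats_alt (text : String) : List (String × Int) :=
  let lines := PySem.Str.splitlines text
  let pairs := (lines.zip lines.tail).reverse
  let rx := pvLastStats "RX:" pairs
  let tx := pvLastStats "TX:" pairs
  [("rx_packets", rx.1), ("rx_dropped", rx.2), ("tx_packets", tx.1), ("tx_dropped", tx.2)]

-- ===== PRECONDITION & SPEC =====
-- Pre_ excludes exactly the inputs where Python A raises ValueError: a line following an
-- RX:/TX: header line whose split has >= 4 fields with field 1 or 3 not an int literal.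
def Pre_parse_iplink_stats (text : String) : Prop :=
  ∀ pr ∈ (PySem.Str.splitlines text).zip (PySem.Str.splitlines text).tail,
    (PySem.Str.startswith (PySem.Str.strip pr.1) "RX:" = true ∨
     PySem.Str.startswith (PySem.Str.strip pr.1) "TX:" = true) →
    4 ≤ (PySem.Str.split₀ pr.2).length →
    (PySem.Int.ofStr? ((PySem.Str.split₀ pr.2).getD 1 "")).isSome = true ∧
    (PySem.Int.ofStr? ((PySem.Str.split₀ pr.2).getD 3 "")).isSome = true

instance (text : String) : Decidable (Pre_parse_iplink_stats text) := by
  unfold Pre_parse_iplink_stats; infer_instance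

def pvWitness_parse_iplink_stats : String := "RX: bytes packets errors dropped\n10 2 0 3\nTX: bytes packets errors dropped\n20 5 0 7"

def Spec_parse_iplink_stats (text : String) (out : List (String × Int)) : Prop := out = parse_iplink_stats_alt text
instance (text : String) (out : List (String × Int)) : Decidable (Spec_parse_iplink_stats text out) := by unfold Spec_parse_iplink_stats; infer_instance

-- ===== CLAIM (what is proved, stated in full; the proofs are below) =====
def Claim_equal_parse_iplink_stats : Prop := ∀ (text : String), Dom_parse_iplink_stats text → Pre_parse_iplink_stats text → Spec_parse_iplink_stats text (parse_iplink_stats text)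

-- ===== LEMMAS AND PROOFS =====

-- the four-key dict with given values, in A's fixed insertion order
def mkD (a b c e : Int) : PySem.Dict String Int :=
  PySem.Dict.ofList [("rx_packets", a), ("rx_dropped", b), ("tx_packets", c), ("tx_dropped", e)]

-- one pair's effect on one counter pair (shared shape of both loops)
def pvG (pfx : String) (x : String × String) (v : Int × Int) : Int × Int :=
  if PySem.Str.startswith (PySem.Str.strip x.1) pfx = true then
    let parts := PySem.Str.split₀ x.2
    if 4 ≤ parts.length then
      (((PySem.Int.ofStr? (parts.getD 1 "")).getD 0),
       ((PySem.Int.ofStr? (parts.getD 3 "")).getD 0))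
    else v
  else v

-- forward fold of pvG (last match wins)
def pvFwd (pfx : String) : List (String × String) → Int × Int → Int × Int
  | [], v => v
  | x :: rest, v => pvFwd pfx rest (pvG pfx x v)

-- pvLastStats with its base value generalized
def pvLastD (pfx : String) : List (String × String) → Int × Int → Int × Int
  | [], v => v
  | (line, next) :: rest, v =>
    if PySem.Str.startswith (PySem.Str.strip line) pfx = true then
      let parts := PySem.Str.split₀ next
      if 4 ≤ parts.length then
        (((PySem.Int.ofStr? (parts.getD 1 "")).getD 0),
         ((PySem.Int.ofStr? (parts.getD 3 "")).getD 0))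
      else pvLastD pfx rest v
    else pvLastD pfx rest v

theorem pvLastStats_eq_pvLastD (pfx : String) (l : List (String × String)) :
    pvLastStats pfx l = pvLastD pfx l (0, 0) := by
  induction l with
  | nil => rfl
  | cons x rest ih =>
    obtain ⟨line, next⟩ := x
    simp only [pvLastStats, pvLastD, ih]

theorem pvLastD_snoc (pfx : String) (m : List (String × String)) (x : String × String)
    (v : Int × Int) : pvLastD pfx (m ++ [x]) v = pvLastD pfx m (pvG pfx x v) := by
  induction m with
  | nil =>
    obtain ⟨line, next⟩ := x
    simp only [List.nil_append, pvLastD, pvG]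
  | cons y rest ih =>
    obtain ⟨line, next⟩ := y
    simp only [List.cons_append, pvLastD, ih]

theorem pvFwd_eq_pvLastD (pfx : String) (l : List (String × String)) (v : Int × Int) :
    pvFwd pfx l v = pvLastD pfx l.reverse v := by
  induction l generalizing v with
  | nil => rfl
  | cons x rest ih =>
    simp only [pvFwd, ih, List.reverse_cons, pvLastD_snoc]

-- a line cannot start with both "RX:" and "TX:"
theorem pv_not_both (s : String) (h1 : PySem.Str.startswith s "RX:" = true)
    (h2 : PySem.Str.startswith s "TX:" = true) : False := by
  simp only [PySem.Str.startswith_eq] at h1 h2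
  rw [PySem.Chars.startswith_iff] at h1 h2
  obtain ⟨t1, e1⟩ := h1
  obtain ⟨t2, e2⟩ := h2
  rw [← e2] at e1
  simp at e1

theorem insert_rx (a b c e p q : Int) :
    ((mkD a b c e).insert "rx_packets" p).insert "rx_dropped" q = mkD p q c e := rfl

theorem insert_tx (a b c e p q : Int) :
    ((mkD a b c e).insert "tx_packets" p).insert "tx_dropped" q = mkD a b p q := rfl

-- A's loop on the four-key dict computes exactly the two forward folds
theorem loopA_char (lines : List String) :
    ∀ a b c e : Int,
      pvLoopA lines (mkD a b c e)
        = mkD (pvFwd "RX:" (lines.zip lines.tail) (a, b)).1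
              (pvFwd "RX:" (lines.zip lines.tail) (a, b)).2
              (pvFwd "TX:" (lines.zip lines.tail) (c, e)).1
              (pvFwd "TX:" (lines.zip lines.tail) (c, e)).2 := by
  induction lines with
  | nil => intro a b c e; rfl
  | cons line rest ih =>
    intro a b c e
    cases rest with
    | nil => simp [pvLoopA, pvFwd]
    | cons next rest' =>
      have hzip : (line :: next :: rest').zip (line :: next :: rest').tail
          = (line, next) :: ((next :: rest').zip (next :: rest').tail) := rfl
      have h1 : pvLoopA (line :: next :: rest') (mkD a b c e) =
          pvLoopA (next :: rest')
            (if PySem.Str.startswith (PySem.Str.strip line) "TX:" = true then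
               pvApply "tx_packets" "tx_dropped" next
                 (if PySem.Str.startswith (PySem.Str.strip line) "RX:" = true then
                    pvApply "rx_packets" "rx_dropped" next (mkD a b c e)
                  else mkD a b c e)
             else
               (if PySem.Str.startswith (PySem.Str.strip line) "RX:" = true then
                  pvApply "rx_packets" "rx_dropped" next (mkD a b c e)
                else mkD a b c e)) := rfl
      have hfwd : ∀ (p : String) (v : Int × Int),
          pvFwd p ((line, next) :: (next :: rest').zip (next :: rest').tail) v
            = pvFwd p ((next :: rest').zip (next :: rest').tail) (pvG p (line, next) v) :=
        fun _ _ => rfl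
      rw [hzip, h1, hfwd, hfwd]
      by_cases hrx : PySem.Str.startswith (PySem.Str.strip line) "RX:" = true
      · have htx : PySem.Str.startswith (PySem.Str.strip line) "TX:" = false := by
          cases h : PySem.Str.startswith (PySem.Str.strip line) "TX:" with
          | false => rfl
          | true => exact (pv_not_both _ hrx h).elim
        rw [if_neg (by rw [htx]; simp), if_pos hrx]
        simp only [pvApply]
        by_cases hlen : 4 ≤ (PySem.Str.split₀ next).length
        · rw [if_pos hlen, insert_rx, ih]
          simp only [pvG, hrx, htx, hlen, if_true, Bool.false_eq_true, if_false]
        · rw [if_neg hlen, ih]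
          simp only [pvG, hrx, htx, hlen, if_true, Bool.false_eq_true, if_false]
      · have hrx' : PySem.Str.startswith (PySem.Str.strip line) "RX:" = false := by
          cases h : PySem.Str.startswith (PySem.Str.strip line) "RX:" with
          | false => rfl
          | true => exact (hrx h).elim
        by_cases htx : PySem.Str.startswith (PySem.Str.strip line) "TX:" = true
        · rw [if_pos htx, if_neg (by rw [hrx']; simp)]
          simp only [pvApply]
          by_cases hlen : 4 ≤ (PySem.Str.split₀ next).length
          · rw [if_pos hlen, insert_tx, ih]
            simp only [pvG, hrx', htx, hlen, if_true, Bool.false_eq_true, if_false]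
          · rw [if_neg hlen, ih]
            simp only [pvG, hrx', htx, hlen, if_true, Bool.false_eq_true, if_false]
        · have htx' : PySem.Str.startswith (PySem.Str.strip line) "TX:" = false := by
            cases h : PySem.Str.startswith (PySem.Str.strip line) "TX:" with
            | false => rfl
            | true => exact (htx h).elim
          rw [if_neg (by rw [htx']; simp), if_neg (by rw [hrx']; simp), ih]
          simp only [pvG, hrx', htx', Bool.false_eq_true, if_false]

-- ===== VERDICT (by name: the statement is the Claim_ definition above) =====
theorem parse_iplink_stats_spec : Claim_equal_parse_iplink_stats := by
  intro text _ _
  show parse_iplink_stats text = parse_iplink_stats_alt text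
  unfold parse_iplink_stats parse_iplink_stats_alt
  have hinit : pvInit = mkD 0 0 0 0 := rfl
  rw [hinit, loopA_char]
  simp only [pvLastStats_eq_pvLastD, pvFwd_eq_pvLastD]
  rfl
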